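-- pv_equiv track=rewrite | github.com/aberdichevskaia/catalytic-sites-annotation | cross_validation_dataset_building/split.py | get_catalytic_class
-- ===== SOURCE A (Python) =====
-- def get_catalytic_class(residues):             # add more classes?
--     if any(r in residues for r in "ILMVWF"):
--         return 0
--     if any(r in residues for r in "AGP"):
--         return 1
--     if any(r in residues for r in "QN"):
--         return 2
--     if any(r in residues for r in "KR"):
--         return 3
--     if any(r == "S"  for r in residues):
--         return 4
--     if any(r == "T"  for r in residues):
--         return 5
--     if any(r in residues for r in "DE"):
--         return 6
--     return 7
-- ===== SOURCE B (Python) =====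
-- CLASS_OF = {
--     "I": 0, "L": 0, "M": 0, "V": 0, "W": 0, "F": 0,
--     "A": 1, "G": 1, "P": 1,
--     "Q": 2, "N": 2,
--     "K": 3, "R": 3,
--     "S": 4,
--     "T": 5,
--     "D": 6, "E": 6,
-- }
--
-- def get_catalytic_class(residues):
--     best = 7
--     for r in residues:
--         best = min(best, CLASS_OF.get(r, 7))
--     return best
-- ===== Notes on version B (the rewrite author's own statement) =====
-- stated objective: alternative
-- what changed: Replaces A's seven priority-ordered membership scans over the residue string with a literal char->class table and a single fold over the residues taking the minimum class (default 7).
import Mathlib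
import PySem

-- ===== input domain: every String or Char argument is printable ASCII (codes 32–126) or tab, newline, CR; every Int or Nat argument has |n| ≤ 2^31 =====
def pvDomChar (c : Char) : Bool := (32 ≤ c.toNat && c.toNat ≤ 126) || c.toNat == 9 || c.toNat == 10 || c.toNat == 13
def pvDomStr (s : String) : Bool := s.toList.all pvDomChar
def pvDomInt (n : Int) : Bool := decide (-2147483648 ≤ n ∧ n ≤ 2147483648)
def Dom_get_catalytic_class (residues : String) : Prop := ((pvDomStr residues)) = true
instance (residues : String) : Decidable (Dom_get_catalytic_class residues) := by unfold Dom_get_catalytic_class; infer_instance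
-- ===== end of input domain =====

-- B replaces A's priority-ordered per-class membership scans with one char→class
-- table and a single minimum-taking pass over the residues (objective: alternative).

-- ===== PORT A =====
-- `r in residues` is Python's substring test (r is a single-char string): PySem.Chars.isIn [r].
def get_catalytic_class (residues : String) : Int :=
  if "ILMVWF".toList.any (fun r => PySem.Chars.isIn [r] residues.toList) then 0
  else if "AGP".toList.any (fun r => PySem.Chars.isIn [r] residues.toList) then 1
  else if "QN".toList.any (fun r => PySem.Chars.isIn [r] residues.toList) then 2
  else if "KR".toList.any (fun r => PySem.Chars.isIn [r] residues.toList) then 3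
  else if residues.toList.any (fun r => r == 'S') then 4
  else if residues.toList.any (fun r => r == 'T') then 5
  else if "DE".toList.any (fun r => PySem.Chars.isIn [r] residues.toList) then 6
  else 7

-- ===== PORT B =====
def CLASS_OF : PySem.Dict Char Int := PySem.Dict.ofList
  [('I', 0), ('L', 0), ('M', 0), ('V', 0), ('W', 0), ('F', 0),
   ('A', 1), ('G', 1), ('P', 1),
   ('Q', 2), ('N', 2),
   ('K', 3), ('R', 3),
   ('S', 4),
   ('T', 5),
   ('D', 6), ('E', 6)]

def get_catalytic_class_alt (residues : String) : Int :=
  residues.toList.foldl (fun best r => min best (CLASS_OF.getD r 7)) 7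

-- ===== PRECONDITION & SPEC =====
def Spec_get_catalytic_class (residues : String) (out : Int) : Prop := out = get_catalytic_class_alt residues
instance (residues : String) (out : Int) : Decidable (Spec_get_catalytic_class residues out) := by unfold Spec_get_catalytic_class; infer_instance

-- ===== CLAIM (what is proved, stated in full; the proofs are below) =====
def Claim_equal_get_catalytic_class : Prop := ∀ (residues : String), Dom_get_catalytic_class residues → Spec_get_catalytic_class residues (get_catalytic_class residues)

-- ===== LEMMAS AND PROOFS =====

-- A's cascade, restated on the character list of the input.
def acore (l : List Char) : Int :=
  if "ILMVWF".toList.any (fun r => l.contains r) then 0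
  else if "AGP".toList.any (fun r => l.contains r) then 1
  else if "QN".toList.any (fun r => l.contains r) then 2
  else if "KR".toList.any (fun r => l.contains r) then 3
  else if l.any (fun r => r == 'S') then 4
  else if l.any (fun r => r == 'T') then 5
  else if "DE".toList.any (fun r => l.contains r) then 6
  else 7

-- B's table lookup, restated as a membership cascade.
def gclass (c : Char) : Int :=
  if "ILMVWF".toList.contains c then 0
  else if "AGP".toList.contains c then 1
  else if "QN".toList.contains c then 2
  else if "KR".toList.contains c then 3
  else if c == 'S' then 4
  else if c == 'T' then 5
  else if "DE".toList.contains c then 6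
  else 7

lemma isIn_singleton (c : Char) (l : List Char) : PySem.Chars.isIn [c] l = l.contains c := by
  rcases h : l.contains c with _ | _
  · rw [PySem.Chars.isIn_eq_false_iff]
    intro hinf
    have : c ∈ l := hinf.subset (List.mem_singleton_self c)
    simp [this] at h
  · rw [PySem.Chars.isIn_iff_infix]
    have hm : c ∈ l := by simpa using h
    obtain ⟨a, b, rfl⟩ := List.append_of_mem hm
    exact ⟨a, b, by simp⟩

lemma A_eq_acore (s : String) : get_catalytic_class s = acore s.toList := by
  simp [get_catalytic_class, acore, isIn_singleton]

set_option maxHeartbeats 4000000 in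
lemma cl_mk : CLASS_OF = PySem.Dict.mk
  [('I', 0), ('L', 0), ('M', 0), ('V', 0), ('W', 0), ('F', 0),
   ('A', 1), ('G', 1), ('P', 1), ('Q', 2), ('N', 2), ('K', 3), ('R', 3),
   ('S', 4), ('T', 5), ('D', 6), ('E', 6)] := by decide

set_option maxHeartbeats 1000000 in
lemma getD_eq_gclass (c : Char) : CLASS_OF.getD c 7 = gclass c := by
  rw [cl_mk]
  by_cases h0 : c = 'I'
  · subst h0; decide
  by_cases h1 : c = 'L'
  · subst h1; decide
  by_cases h2 : c = 'M'
  · subst h2; decide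
  by_cases h3 : c = 'V'
  · subst h3; decide
  by_cases h4 : c = 'W'
  · subst h4; decide
  by_cases h5 : c = 'F'
  · subst h5; decide
  by_cases h6 : c = 'A'
  · subst h6; decide
  by_cases h7 : c = 'G'
  · subst h7; decide
  by_cases h8 : c = 'P'
  · subst h8; decide
  by_cases h9 : c = 'Q'
  · subst h9; decide
  by_cases h10 : c = 'N'
  · subst h10; decide
  by_cases h11 : c = 'K'
  · subst h11; decide
  by_cases h12 : c = 'R'
  · subst h12; decide
  by_cases h13 : c = 'S'
  · subst h13; decide
  by_cases h14 : c = 'T'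
  · subst h14; decide
  by_cases h15 : c = 'D'
  · subst h15; decide
  by_cases h16 : c = 'E'
  · subst h16; decide
  simp [gclass, PySem.Dict.getD_eq_get?_getD, PySem.Dict.get?_mk_cons,
    h0, h1, h2, h3, h4, h5, h6, h7, h8, h9, h10, h11, h12, h13, h14, h15, h16, Ne.symm h0, Ne.symm h1, Ne.symm h2, Ne.symm h3, Ne.symm h4, Ne.symm h5, Ne.symm h6, Ne.symm h7, Ne.symm h8, Ne.symm h9, Ne.symm h10, Ne.symm h11, Ne.symm h12, Ne.symm h13, Ne.symm h14, Ne.symm h15, Ne.symm h16]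
  rfl

lemma acore_bounds (l : List Char) : 0 ≤ acore l ∧ acore l ≤ 7 := by
  unfold acore; split_ifs <;> omega

lemma anyIn_cons (g : List Char) (c : Char) (l : List Char) :
    g.any (fun r => (c :: l).contains r) = (g.contains c || g.any (fun r => l.contains r)) := by
  induction g with
  | nil => simp
  | cons a g ih =>
    simp only [List.any_cons]
    rw [ih]
    simp only [List.contains_cons]
    rw [show (a == c) = (c == a) from by simp [eq_comm]]
    cases c == a <;> cases l.contains a <;> simp

set_option maxHeartbeats 1000000 in
lemma acore_cons (c : Char) (l : List Char) :
    acore (c :: l) = min (gclass c) (acore l) := by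
  by_cases h0 : ("ILMVWF".toList.contains c) = true
  · have hg : gclass c = 0 := by
      unfold gclass; rw [if_pos h0]
    have e0 : ("ILMVWF".toList.any (fun r => (c :: l).contains r)) = true := by
      rw [anyIn_cons, h0, Bool.true_or]
    rw [hg]
    unfold acore
    rw [e0]
    split_ifs <;> first | omega | exact absurd rfl (by assumption)
  rw [Bool.not_eq_true] at h0
  by_cases h1 : ("AGP".toList.contains c) = true
  · have hg : gclass c = 1 := by
      unfold gclass; rw [if_neg (ne_true_of_eq_false h0), if_pos h1]
    have e0 : ("ILMVWF".toList.any (fun r => (c :: l).contains r)) = ("ILMVWF".toList.any (fun r => l.contains r)) := by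
      rw [anyIn_cons, h0, Bool.false_or]
    have e1 : ("AGP".toList.any (fun r => (c :: l).contains r)) = true := by
      rw [anyIn_cons, h1, Bool.true_or]
    rw [hg]
    unfold acore
    rw [e0, e1]
    split_ifs <;> first | omega | exact absurd rfl (by assumption)
  rw [Bool.not_eq_true] at h1
  by_cases h2 : ("QN".toList.contains c) = true
  · have hg : gclass c = 2 := by
      unfold gclass; rw [if_neg (ne_true_of_eq_false h0), if_neg (ne_true_of_eq_false h1), if_pos h2]
    have e0 : ("ILMVWF".toList.any (fun r => (c :: l).contains r)) = ("ILMVWF".toList.any (fun r => l.contains r)) := by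
      rw [anyIn_cons, h0, Bool.false_or]
    have e1 : ("AGP".toList.any (fun r => (c :: l).contains r)) = ("AGP".toList.any (fun r => l.contains r)) := by
      rw [anyIn_cons, h1, Bool.false_or]
    have e2 : ("QN".toList.any (fun r => (c :: l).contains r)) = true := by
      rw [anyIn_cons, h2, Bool.true_or]
    rw [hg]
    unfold acore
    rw [e0, e1, e2]
    split_ifs <;> first | omega | exact absurd rfl (by assumption)
  rw [Bool.not_eq_true] at h2
  by_cases h3 : ("KR".toList.contains c) = true
  · have hg : gclass c = 3 := by
      unfold gclass; rw [if_neg (ne_true_of_eq_false h0), if_neg (ne_true_of_eq_false h1), if_neg (ne_true_of_eq_false h2), if_pos h3]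
    have e0 : ("ILMVWF".toList.any (fun r => (c :: l).contains r)) = ("ILMVWF".toList.any (fun r => l.contains r)) := by
      rw [anyIn_cons, h0, Bool.false_or]
    have e1 : ("AGP".toList.any (fun r => (c :: l).contains r)) = ("AGP".toList.any (fun r => l.contains r)) := by
      rw [anyIn_cons, h1, Bool.false_or]
    have e2 : ("QN".toList.any (fun r => (c :: l).contains r)) = ("QN".toList.any (fun r => l.contains r)) := by
      rw [anyIn_cons, h2, Bool.false_or]
    have e3 : ("KR".toList.any (fun r => (c :: l).contains r)) = true := by
      rw [anyIn_cons, h3, Bool.true_or]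
    rw [hg]
    unfold acore
    rw [e0, e1, e2, e3]
    split_ifs <;> first | omega | exact absurd rfl (by assumption)
  rw [Bool.not_eq_true] at h3
  by_cases h4 : (c == 'S') = true
  · have hg : gclass c = 4 := by
      unfold gclass; rw [if_neg (ne_true_of_eq_false h0), if_neg (ne_true_of_eq_false h1), if_neg (ne_true_of_eq_false h2), if_neg (ne_true_of_eq_false h3), if_pos h4]
    have e0 : ("ILMVWF".toList.any (fun r => (c :: l).contains r)) = ("ILMVWF".toList.any (fun r => l.contains r)) := by
      rw [anyIn_cons, h0, Bool.false_or]
    have e1 : ("AGP".toList.any (fun r => (c :: l).contains r)) = ("AGP".toList.any (fun r => l.contains r)) := by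
      rw [anyIn_cons, h1, Bool.false_or]
    have e2 : ("QN".toList.any (fun r => (c :: l).contains r)) = ("QN".toList.any (fun r => l.contains r)) := by
      rw [anyIn_cons, h2, Bool.false_or]
    have e3 : ("KR".toList.any (fun r => (c :: l).contains r)) = ("KR".toList.any (fun r => l.contains r)) := by
      rw [anyIn_cons, h3, Bool.false_or]
    have e4 : ((c :: l).any (fun r => r == 'S')) = true := by
      rw [List.any_cons, h4, Bool.true_or]
    rw [hg]
    unfold acore
    rw [e0, e1, e2, e3, e4]
    split_ifs <;> first | omega | exact absurd rfl (by assumption)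
  rw [Bool.not_eq_true] at h4
  by_cases h5 : (c == 'T') = true
  · have hg : gclass c = 5 := by
      unfold gclass; rw [if_neg (ne_true_of_eq_false h0), if_neg (ne_true_of_eq_false h1), if_neg (ne_true_of_eq_false h2), if_neg (ne_true_of_eq_false h3), if_neg (ne_true_of_eq_false h4), if_pos h5]
    have e0 : ("ILMVWF".toList.any (fun r => (c :: l).contains r)) = ("ILMVWF".toList.any (fun r => l.contains r)) := by
      rw [anyIn_cons, h0, Bool.false_or]
    have e1 : ("AGP".toList.any (fun r => (c :: l).contains r)) = ("AGP".toList.any (fun r => l.contains r)) := by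
      rw [anyIn_cons, h1, Bool.false_or]
    have e2 : ("QN".toList.any (fun r => (c :: l).contains r)) = ("QN".toList.any (fun r => l.contains r)) := by
      rw [anyIn_cons, h2, Bool.false_or]
    have e3 : ("KR".toList.any (fun r => (c :: l).contains r)) = ("KR".toList.any (fun r => l.contains r)) := by
      rw [anyIn_cons, h3, Bool.false_or]
    have e4 : ((c :: l).any (fun r => r == 'S')) = (l.any (fun r => r == 'S')) := by
      rw [List.any_cons, h4, Bool.false_or]
    have e5 : ((c :: l).any (fun r => r == 'T')) = true := by
      rw [List.any_cons, h5, Bool.true_or]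
    rw [hg]
    unfold acore
    rw [e0, e1, e2, e3, e4, e5]
    split_ifs <;> first | omega | exact absurd rfl (by assumption)
  rw [Bool.not_eq_true] at h5
  by_cases h6 : ("DE".toList.contains c) = true
  · have hg : gclass c = 6 := by
      unfold gclass; rw [if_neg (ne_true_of_eq_false h0), if_neg (ne_true_of_eq_false h1), if_neg (ne_true_of_eq_false h2), if_neg (ne_true_of_eq_false h3), if_neg (ne_true_of_eq_false h4), if_neg (ne_true_of_eq_false h5), if_pos h6]
    have e0 : ("ILMVWF".toList.any (fun r => (c :: l).contains r)) = ("ILMVWF".toList.any (fun r => l.contains r)) := by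
      rw [anyIn_cons, h0, Bool.false_or]
    have e1 : ("AGP".toList.any (fun r => (c :: l).contains r)) = ("AGP".toList.any (fun r => l.contains r)) := by
      rw [anyIn_cons, h1, Bool.false_or]
    have e2 : ("QN".toList.any (fun r => (c :: l).contains r)) = ("QN".toList.any (fun r => l.contains r)) := by
      rw [anyIn_cons, h2, Bool.false_or]
    have e3 : ("KR".toList.any (fun r => (c :: l).contains r)) = ("KR".toList.any (fun r => l.contains r)) := by
      rw [anyIn_cons, h3, Bool.false_or]
    have e4 : ((c :: l).any (fun r => r == 'S')) = (l.any (fun r => r == 'S')) := by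
      rw [List.any_cons, h4, Bool.false_or]
    have e5 : ((c :: l).any (fun r => r == 'T')) = (l.any (fun r => r == 'T')) := by
      rw [List.any_cons, h5, Bool.false_or]
    have e6 : ("DE".toList.any (fun r => (c :: l).contains r)) = true := by
      rw [anyIn_cons, h6, Bool.true_or]
    rw [hg]
    unfold acore
    rw [e0, e1, e2, e3, e4, e5, e6]
    split_ifs <;> first | omega | exact absurd rfl (by assumption)
  rw [Bool.not_eq_true] at h6
  have hg : gclass c = 7 := by
    unfold gclass; rw [if_neg (ne_true_of_eq_false h0), if_neg (ne_true_of_eq_false h1), if_neg (ne_true_of_eq_false h2), if_neg (ne_true_of_eq_false h3), if_neg (ne_true_of_eq_false h4), if_neg (ne_true_of_eq_false h5), if_neg (ne_true_of_eq_false h6)]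
  have e0 : ("ILMVWF".toList.any (fun r => (c :: l).contains r)) = ("ILMVWF".toList.any (fun r => l.contains r)) := by
    rw [anyIn_cons, h0, Bool.false_or]
  have e1 : ("AGP".toList.any (fun r => (c :: l).contains r)) = ("AGP".toList.any (fun r => l.contains r)) := by
    rw [anyIn_cons, h1, Bool.false_or]
  have e2 : ("QN".toList.any (fun r => (c :: l).contains r)) = ("QN".toList.any (fun r => l.contains r)) := by
    rw [anyIn_cons, h2, Bool.false_or]
  have e3 : ("KR".toList.any (fun r => (c :: l).contains r)) = ("KR".toList.any (fun r => l.contains r)) := by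
    rw [anyIn_cons, h3, Bool.false_or]
  have e4 : ((c :: l).any (fun r => r == 'S')) = (l.any (fun r => r == 'S')) := by
    rw [List.any_cons, h4, Bool.false_or]
  have e5 : ((c :: l).any (fun r => r == 'T')) = (l.any (fun r => r == 'T')) := by
    rw [List.any_cons, h5, Bool.false_or]
  have e6 : ("DE".toList.any (fun r => (c :: l).contains r)) = ("DE".toList.any (fun r => l.contains r)) := by
    rw [anyIn_cons, h6, Bool.false_or]
  rw [hg]
  unfold acore
  rw [e0, e1, e2, e3, e4, e5, e6]
  split_ifs <;> omega

lemma foldl_min_eq (l : List Char) : ∀ b : Int, b ≤ 7 →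
    l.foldl (fun best r => min best (CLASS_OF.getD r 7)) b = min b (acore l) := by
  induction l with
  | nil => intro b hb; simp [acore]; omega
  | cons c l ih =>
    intro b hb
    simp only [List.foldl_cons]
    rw [ih _ (le_trans (min_le_left _ _) hb), getD_eq_gclass, acore_cons, min_assoc]

-- ===== VERDICT (by name: the statement is the Claim_ definition above) =====
theorem get_catalytic_class_spec : Claim_equal_get_catalytic_class := by
  intro s _
  unfold Spec_get_catalytic_class
  rw [get_catalytic_class_alt.eq_def, foldl_min_eq _ 7 le_rfl, A_eq_acore]
  have := acore_bounds s.toList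
  omega
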